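-- pv_equiv track=rewrite | github.com/cyrsiansk/psparser | classes/PartySlateProvider.py | get_next_hex_string
-- ===== SOURCE A (Python) =====
-- def get_next_hex_string(s: str) -> str:
--     res = ""
--     alpha = "0123456789abcdef"
--     for c in s:
--         if c in alpha:
--             res += c
--         else:
--             break
--     return res
-- ===== SOURCE B (Python) =====
-- def get_next_hex_string(s: str) -> str:
--     # The hex prefix ends where lstrip'ing all hex digits begins:
--     # its length is len(s) - len(s.lstrip(hexdigits)).
--     return s[:len(s) - len(s.lstrip("0123456789abcdef"))]
-- ===== Notes on version B (the rewrite author's own statement) =====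
-- stated objective: idiomatic
-- what changed: B has no explicit loop: it computes the prefix length as len(s) - len(s.lstrip(hexdigits)) and returns one slice, instead of A's character-by-character loop accumulating res and breaking on the first non-hex character.
import Mathlib
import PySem

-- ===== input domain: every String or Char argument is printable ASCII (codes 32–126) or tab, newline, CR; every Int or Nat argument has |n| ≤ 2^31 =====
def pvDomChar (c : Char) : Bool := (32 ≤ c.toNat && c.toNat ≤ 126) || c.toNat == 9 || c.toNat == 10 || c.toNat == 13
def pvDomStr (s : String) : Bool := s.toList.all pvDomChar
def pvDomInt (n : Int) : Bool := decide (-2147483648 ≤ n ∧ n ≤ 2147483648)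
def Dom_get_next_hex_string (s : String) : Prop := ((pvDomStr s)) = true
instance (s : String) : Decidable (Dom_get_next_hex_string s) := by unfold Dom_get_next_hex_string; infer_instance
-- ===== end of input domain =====

-- B is loop-free: prefix length = len(s) - len(s.lstrip(hexdigits)), then one slice,
-- instead of A's char-by-char accumulate-with-break loop (objective: idiomatic).

-- ===== PORT A =====
-- 'for c in s: if c in alpha: res += c else: break' — loop with accumulator res
def pvGoA (cs : List Char) (res : List Char) : List Char :=
  match cs with
  | [] => res
  | c :: rest => if c ∈ "0123456789abcdef".toList then pvGoA rest (res ++ [c]) else res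

def get_next_hex_string (s : String) : String :=
  String.ofList (pvGoA s.toList [])

-- ===== PORT B =====
-- s.lstrip("0123456789abcdef") ported by hand: drop leading chars that are in the
-- chars argument — exact for str.lstrip with a chars argument; then s[:len(s)-len(stripped)]
def get_next_hex_string_alt (s : String) : String :=
  String.ofList (PySem.List.slice s.toList none
    (some (((s.toList.length
      - (s.toList.dropWhile (fun c => "0123456789abcdef".toList.contains c)).length : Nat)) : Int)))

-- ===== PRECONDITION & SPEC =====
def Spec_get_next_hex_string (s : String) (out : String) : Prop := out = get_next_hex_string_alt s
instance (s : String) (out : String) : Decidable (Spec_get_next_hex_string s out) := by unfold Spec_get_next_hex_string; infer_instance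

-- ===== CLAIM (what is proved, stated in full; the proofs are below) =====
def Claim_equal_get_next_hex_string : Prop := ∀ (s : String), Dom_get_next_hex_string s → Spec_get_next_hex_string s (get_next_hex_string s)

-- ===== LEMMAS AND PROOFS =====
-- A's loop computes takeWhile of the hex test
theorem pvGoA_eq_takeWhile (cs : List Char) (res : List Char) :
    pvGoA cs res = res ++ cs.takeWhile (fun c => "0123456789abcdef".toList.contains c) := by
  induction cs generalizing res with
  | nil => simp [pvGoA]
  | cons c rest ih =>
    rw [pvGoA, List.takeWhile]
    by_cases h : c ∈ "0123456789abcdef".toList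
    · simp only [if_pos h, ih, List.contains_eq_mem, decide_eq_true h]
      simp
    · simp only [if_neg h, List.contains_eq_mem, decide_eq_false h]
      simp

-- taking (length − length of the dropWhile suffix) recovers the takeWhile prefix
theorem pvTake_sub_dropWhile (cs : List Char) (p : Char → Bool) :
    cs.take (cs.length - (cs.dropWhile p).length) = cs.takeWhile p := by
  have hlen : (cs.takeWhile p).length + (cs.dropWhile p).length = cs.length := by
    rw [← List.length_append, List.takeWhile_append_dropWhile]
  have h2 : cs.length - (cs.dropWhile p).length = (cs.takeWhile p).length := by omega
  rw [h2]
  exact (List.prefix_iff_eq_take.mp (List.takeWhile_prefix p)).symm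

-- ===== VERDICT (by name: the statement is the Claim_ definition above) =====
theorem get_next_hex_string_spec : Claim_equal_get_next_hex_string := by
  intro s _
  unfold Spec_get_next_hex_string get_next_hex_string get_next_hex_string_alt
  rw [PySem.List.slice_to_natCast, pvGoA_eq_takeWhile, pvTake_sub_dropWhile]
  simp
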